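-- pv_equiv track=rewrite | github.com/kmbrgandhi/reu-code | REU_code/exhaustive.py | bal
-- ===== SOURCE A (Python) =====
-- def bal(lst):
--     """
--     The balance of a list; the difference between the number of 1's and -1's.
--
--     :param lst: the list in question
--     :type lst: array
--     :return: the difference between the # of 1's and -1's in lst.
--     """
--     num_1 = 0
--     num_0 = 0
--     for i in range(len(lst)):
--         if lst[i] == 1:
--             num_1 +=1
--         else:
--             num_0 +=1
--     return num_1 - num_0
-- ===== SOURCE B (Python) =====
-- def bal(lst):
--     # Divide and conquer: the balance of a list is the sum of the balances
--     # of its two halves; a singleton contributes +1 for a 1, -1 otherwise.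
--     def go(lo, hi):
--         n = hi - lo
--         if n == 0:
--             return 0
--         if n == 1:
--             return 1 if lst[lo] == 1 else -1
--         mid = (lo + hi) // 2
--         return go(lo, mid) + go(mid, hi)
--     return go(0, len(lst))
-- ===== Notes on version B (the rewrite author's own statement) =====
-- stated objective: alternative
-- what changed: Replaces A's indexed accumulator loop (two running counters) by a divide-and-conquer recursion: split the index range at its midpoint, a singleton contributes +1 if it is 1 and -1 otherwise, and the two half-balances are summed.
import Mathlib
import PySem

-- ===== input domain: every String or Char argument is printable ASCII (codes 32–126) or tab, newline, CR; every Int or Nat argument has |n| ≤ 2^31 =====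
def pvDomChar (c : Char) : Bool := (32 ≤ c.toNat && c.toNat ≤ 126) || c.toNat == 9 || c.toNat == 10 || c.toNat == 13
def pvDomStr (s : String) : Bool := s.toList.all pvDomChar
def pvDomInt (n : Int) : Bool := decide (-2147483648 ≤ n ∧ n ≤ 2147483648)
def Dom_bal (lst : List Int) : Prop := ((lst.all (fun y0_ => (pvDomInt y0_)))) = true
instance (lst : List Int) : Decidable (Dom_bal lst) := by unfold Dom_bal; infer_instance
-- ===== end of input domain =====

-- B replaces A's two-accumulator indexed loop by a divide-and-conquer recursion over index ranges (alternative decomposition, same cost).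

-- ===== PORT A =====
-- for i in range(len(lst)): if lst[i] == 1: num_1 += 1 else: num_0 += 1; return num_1 - num_0
def bal (lst : List Int) : Int :=
  let st : Int × Int :=
    (PySem.List.pyRange 0 lst.length 1).foldl
      (fun p i => if PySem.List.pyGetD lst i 0 = 1 then (p.1 + 1, p.2) else (p.1, p.2 + 1))
      (0, 0)
  st.1 - st.2

-- ===== PORT B =====
-- the inner recursive helper go(lo, hi); the final 'else 0' branch is unreachable from
-- the top-level call (go is only ever reached with lo ≤ hi) and only makes the Lean
-- recursion total; the index lst[lo] is always in range at the call sites.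
def balGo (lst : List Int) (lo hi : Int) : Int :=
  if hi - lo = 0 then 0
  else if hi - lo = 1 then (if PySem.List.pyGetD lst lo 0 = 1 then 1 else -1)
  else if _h2 : 2 ≤ hi - lo then
    let mid := PySem.Int.floordiv (lo + hi) 2
    balGo lst lo mid + balGo lst mid hi
  else 0
termination_by (hi - lo).toNat
decreasing_by
  all_goals
    have h := PySem.Int.floordiv_mul_add_mod (lo + hi) 2
    have hm := PySem.Int.mod_nonneg (lo + hi) (b := 2) (by omega)
    have hm2 := PySem.Int.mod_lt (lo + hi) (b := 2) (by omega)
  all_goals omega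

def bal_alt (lst : List Int) : Int := balGo lst 0 lst.length

-- ===== PRECONDITION & SPEC =====
def Spec_bal (lst : List Int) (out : Int) : Prop := out = bal_alt lst
instance (lst : List Int) (out : Int) : Decidable (Spec_bal lst out) := by unfold Spec_bal; infer_instance

-- ===== CLAIM (what is proved, stated in full; the proofs are below) =====
def Claim_equal_bal : Prop := ∀ (lst : List Int), Dom_bal lst → Spec_bal lst (bal lst)

-- ===== LEMMAS AND PROOFS =====

-- the ±1 sum over an index interval; both programs compute balS lst 0 len
noncomputable def balS (lst : List Int) (lo hi : Int) : Int :=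
  ∑ i ∈ Finset.Ico lo hi, (if PySem.List.pyGetD lst i 0 = 1 then (1 : Int) else -1)

theorem balS_empty (lst : List Int) (lo hi : Int) (h : ¬ lo < hi) : balS lst lo hi = 0 := by
  unfold balS
  rw [Finset.Ico_eq_empty h, Finset.sum_empty]

theorem balGo_eq_balS (lst : List Int) (lo hi : Int) : balGo lst lo hi = balS lst lo hi := by
  induction lo, hi using balGo.induct lst with
  | case1 lo hi h0 =>
    rw [balGo, if_pos h0, balS_empty _ _ _ (by omega)]
  | case2 lo hi h0 h1 hget =>
    rw [balGo, if_neg h0, if_pos h1]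
    have hhi : hi = lo + 1 := by omega
    subst hhi
    unfold balS
    rw [show Finset.Ico lo (lo + 1) = {lo} from by ext x; simp; omega, Finset.sum_singleton]
  | case3 lo hi h0 h1 hget =>
    rw [balGo, if_neg h0, if_pos h1]
    have hhi : hi = lo + 1 := by omega
    subst hhi
    unfold balS
    rw [show Finset.Ico lo (lo + 1) = {lo} from by ext x; simp; omega, Finset.sum_singleton]
  | case4 lo hi h0 h1 h2 mid ih1 ih2 =>
    rw [balGo, if_neg h0, if_neg h1, dif_pos h2]
    have h := PySem.Int.floordiv_mul_add_mod (lo + hi) 2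
    have hm := PySem.Int.mod_nonneg (lo + hi) (b := 2) (by omega)
    have hm2 := PySem.Int.mod_lt (lo + hi) (b := 2) (by omega)
    show balGo lst lo _ + balGo lst _ hi = _
    rw [ih1, ih2]
    unfold balS
    rw [← Finset.Ico_union_Ico_eq_Ico (show lo ≤ mid by omega) (show mid ≤ hi by omega),
        Finset.sum_union (Finset.Ico_disjoint_Ico_consecutive lo mid hi)]
  | case5 lo hi h0 h1 h2 =>
    rw [balGo, if_neg h0, if_neg h1, dif_neg h2, balS_empty _ _ _ (by omega)]

theorem pyGetD_append_left (xs : List Int) (x : Int) (i : Int) (h0 : 0 ≤ i)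
    (h : i < (xs.length : Int)) (d : Int) :
    PySem.List.pyGetD (xs ++ [x]) i d = PySem.List.pyGetD xs i d := by
  rw [PySem.List.pyGetD_eq_getElem (xs ++ [x]) d h0 (by simp; omega),
      PySem.List.pyGetD_eq_getElem xs d h0 h]
  exact List.getElem_append_left (by omega)

theorem balS_closed (lst : List Int) :
    balS lst 0 lst.length = 2 * lst.count 1 - lst.length := by
  induction lst using List.reverseRecOn with
  | nil => simp [balS]
  | append_singleton xs x ih =>
    have hsplit : balS (xs ++ [x]) 0 (xs ++ [x]).length
        = balS (xs ++ [x]) 0 xs.length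
          + ∑ i ∈ Finset.Ico (xs.length : Int) ((xs ++ [x]).length : Int),
              (if PySem.List.pyGetD (xs ++ [x]) i 0 = 1 then (1 : Int) else -1) := by
      unfold balS
      rw [← Finset.Ico_union_Ico_eq_Ico (show (0:Int) ≤ (xs.length:Int) by positivity)
            (show (xs.length:Int) ≤ ((xs ++ [x]).length:Int) by push_cast [List.length_append]; omega),
          Finset.sum_union (Finset.Ico_disjoint_Ico_consecutive 0 (xs.length:Int) ((xs ++ [x]).length:Int))]
    have hsame : balS (xs ++ [x]) 0 xs.length = balS xs 0 xs.length := by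
      unfold balS
      refine Finset.sum_congr rfl (fun i hi => ?_)
      simp only [Finset.mem_Ico] at hi
      rw [pyGetD_append_left xs x i hi.1 hi.2]
    have hlast : ∑ i ∈ Finset.Ico (xs.length : Int) ((xs ++ [x]).length : Int),
        (if PySem.List.pyGetD (xs ++ [x]) i 0 = 1 then (1 : Int) else -1)
        = (if x = 1 then (1 : Int) else -1) := by
      have hset : Finset.Ico (xs.length : Int) ((xs ++ [x]).length : Int)
          = {(xs.length : Int)} := by
        ext y; simp; omega
      rw [hset, Finset.sum_singleton,
          PySem.List.pyGetD_eq_getElem (xs ++ [x]) 0 (by positivity) (by simp)]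
      simp
    rw [hsplit, hsame, hlast, ih]
    simp [List.count_append]
    by_cases hx : x = 1 <;> simp [hx] <;> ring

-- invariant of A's loop, run over the list itself
theorem bal_foldl_inv (lst : List Int) (a b : Int) :
    lst.foldl (fun (p : Int × Int) x => if x = 1 then (p.1 + 1, p.2) else (p.1, p.2 + 1)) (a, b)
      = (a + lst.count 1, b + (lst.length - lst.count 1 : Int)) := by
  induction lst generalizing a b with
  | nil => simp
  | cons x xs ih =>
    simp only [List.foldl_cons]
    by_cases hx : x = 1
    · rw [if_pos hx, ih]
      subst hx
      simp
      omega
    · rw [if_neg hx, ih]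
      simp [hx]
      omega

-- ===== VERDICT (by name: the statement is the Claim_ definition above) =====
theorem bal_spec : Claim_equal_bal := by
  intro lst _
  unfold Spec_bal bal bal_alt
  rw [PySem.List.foldl_pyRange_zero_pyGetD' lst 0
      (fun (p : Int × Int) x => if x = 1 then (p.1 + 1, p.2) else (p.1, p.2 + 1)) (0, 0)]
  rw [bal_foldl_inv, balGo_eq_balS, balS_closed]
  simp
  ring
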